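-- pv_equiv track=rewrite | github.com/X-Dynamite-X/python-cipher | de_mixed_cipher.py | plain_text_usar
-- ===== SOURCE A (Python) =====
-- def plain_text_usar (letters,cipher_text,key):
--     plain_text =[]
--     for ciph in cipher_text:
--         x=0
--         for k in key:
--             if ciph ==k :
--                 plain_text.append(letters[x])
--             x=x+1
--     finel_plain_text ="".join(plain_text)
--     return finel_plain_text
-- ===== SOURCE B (Python) =====
-- def plain_text_usar(letters, cipher_text, key):
--     positions = {}
--     for i, k in enumerate(key):
--         positions.setdefault(k, []).append(i)
--     plain_text = []
--     for ciph in cipher_text: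
--         for i in positions.get(ciph, []):
--             plain_text.append(letters[i])
--     return "".join(plain_text)
-- ===== Notes on version B (the rewrite author's own statement) =====
-- stated objective: alternative
-- what changed: B builds a dict mapping each key character to its list of positions in one pass over key, then decrypts with a single dict lookup per cipher character, instead of A's full rescan of key for every cipher character.
import Mathlib
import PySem

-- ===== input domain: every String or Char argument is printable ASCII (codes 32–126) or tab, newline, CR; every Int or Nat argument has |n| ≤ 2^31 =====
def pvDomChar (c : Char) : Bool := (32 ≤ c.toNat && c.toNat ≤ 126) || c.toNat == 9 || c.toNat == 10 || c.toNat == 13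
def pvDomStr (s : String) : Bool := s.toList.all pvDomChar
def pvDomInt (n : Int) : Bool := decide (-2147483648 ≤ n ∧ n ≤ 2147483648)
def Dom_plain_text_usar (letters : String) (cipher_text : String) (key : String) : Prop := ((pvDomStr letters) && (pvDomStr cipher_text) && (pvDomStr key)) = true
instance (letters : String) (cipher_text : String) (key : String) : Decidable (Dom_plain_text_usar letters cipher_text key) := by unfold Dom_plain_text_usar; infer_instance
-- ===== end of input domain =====

-- B replaces A's nested rescan of `key` per cipher character by a dict of key-positions
-- built once, then a single lookup per cipher character (objective: alternative algorithm).

-- ===== PORT A =====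
-- letters[x] is PySem.List.pyGet?; Pre_ excludes the inputs where Python raises IndexError,
-- so the `.getD ' '` default is never reached inside Pre_.
def plain_text_usar (letters : String) (cipher_text : String) (key : String) : String :=
  String.ofList (cipher_text.toList.foldl (fun acc ciph =>
    (key.toList.foldl (fun (st : List Char × Int) k =>
        ((if ciph == k then st.1 ++ [(PySem.List.pyGet? letters.toList st.2).getD ' '] else st.1),
         st.2 + 1))
      (acc, 0)).1) [])

-- ===== PORT B =====
def plain_text_usar_alt (letters : String) (cipher_text : String) (key : String) : String :=
  let positions : PySem.Dict Char (List Int) :=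
    (PySem.List.enumerate key.toList).foldl
      (fun d p => d.modify p.2 [] (· ++ [p.1])) PySem.Dict.empty
  String.ofList (cipher_text.toList.foldl (fun acc ciph =>
    acc ++ (positions.getD ciph []).map
      (fun i => (PySem.List.pyGet? letters.toList i).getD ' ')) [])

-- ===== PRECONDITION & SPEC =====
-- Pre_ excludes exactly the inputs where the Python A raises IndexError: a cipher character
-- matching key at an index ≥ len(letters) (B raises identically there; the proof itself
-- holds without it, but those inputs return no value in Python).
def Pre_plain_text_usar (letters : String) (cipher_text : String) (key : String) : Prop :=
  ∀ p ∈ PySem.List.enumerate key.toList, p.2 ∈ cipher_text.toList →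
    p.1 < (letters.toList.length : Int)
instance (letters : String) (cipher_text : String) (key : String) : Decidable (Pre_plain_text_usar letters cipher_text key) := by unfold Pre_plain_text_usar; infer_instance

def pvWitness_plain_text_usar : String × String × String := ("abc", "xbyb", "xbz")

def Spec_plain_text_usar (letters : String) (cipher_text : String) (key : String) (out : String) : Prop := out = plain_text_usar_alt letters cipher_text key
instance (letters : String) (cipher_text : String) (key : String) (out : String) : Decidable (Spec_plain_text_usar letters cipher_text key out) := by unfold Spec_plain_text_usar; infer_instance

-- ===== CLAIM (what is proved, stated in full; the proofs are below) =====
def Claim_equal_plain_text_usar : Prop := ∀ (letters : String) (cipher_text : String) (key : String), Dom_plain_text_usar letters cipher_text key → Pre_plain_text_usar letters cipher_text key → Spec_plain_text_usar letters cipher_text key (plain_text_usar letters cipher_text key)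

-- ===== LEMMAS AND PROOFS =====

-- A's inner loop over key: accumulator + matched letters in enumerate order.
lemma innerA (letters : List Char) (ciph : Char) :
    ∀ (ks : List Char) (acc : List Char) (n : Int),
    (ks.foldl (fun (st : List Char × Int) k =>
        ((if ciph == k then st.1 ++ [(PySem.List.pyGet? letters st.2).getD ' '] else st.1),
         st.2 + 1)) (acc, n)).1
      = acc ++ ((PySem.List.enumerate ks n).filter (fun p => ciph == p.2)).map
          (fun p => (PySem.List.pyGet? letters p.1).getD ' ') := by
  intro ks
  induction ks with
  | nil => intro acc n; simp [PySem.List.enumerate_nil]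
  | cons k ks ih =>
    intro acc n
    simp only [List.foldl_cons]
    by_cases h : ciph == k
    · rw [if_pos h, ih, PySem.List.enumerate_cons]
      simp [h]
    · rw [if_neg h, ih, PySem.List.enumerate_cons]
      simp [h]

-- B's dict of positions: looking up c yields the indices of c in key, in order.
lemma dictB (key : List Char) (c : Char) :
    (((PySem.List.enumerate key).foldl
        (fun (d : PySem.Dict Char (List Int)) p => d.modify p.2 [] (· ++ [p.1]))
        PySem.Dict.empty).getD c [])
      = ((PySem.List.enumerate key).filter (fun p => c == p.2)).map (·.1) := by
  have hswap : (PySem.List.enumerate key).foldl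
      (fun (d : PySem.Dict Char (List Int)) p => d.modify p.2 [] (· ++ [p.1]))
      PySem.Dict.empty
      = ((PySem.List.enumerate key).map (fun p => (p.2, p.1))).foldl
          (fun (d : PySem.Dict Char (List Int)) p => d.modify p.1 [] (· ++ [p.2]))
          PySem.Dict.empty := by
    rw [List.foldl_map]
  rw [hswap, PySem.Dict.getD_foldl_modify_append, PySem.Dict.getD_empty]
  rw [List.filter_map, List.map_map]
  simp only [List.nil_append, Function.comp_def]
  congr 1
  apply List.filter_congr
  intro p _
  simp [BEq.comm]

-- ===== VERDICT (by name: the statement is the Claim_ definition above) =====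
theorem plain_text_usar_spec : Claim_equal_plain_text_usar := by
  intro letters cipher_text key _ _
  unfold Spec_plain_text_usar plain_text_usar plain_text_usar_alt
  congr 1
  apply PySem.List.foldl_congr_mem
  intro acc ciph _
  rw [innerA, dictB, List.map_map]
  rfl
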